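-- pv_equiv track=rewrite | github.com/Ashah17/pm_web | server/detailed_options.py | extract_details
-- ===== SOURCE A (Python) =====
-- def breakdown_section(section):
--     places = []
--     restaurants = []
--     tips = []
--     transportation = []
--
--     lines = section.split("\n")
--     current_list = None
--
--     for line in lines:
--         line = line.strip()
--         if "Places" in line:
--             current_list = places
--         elif "Restaurant" in line:
--             current_list = restaurants
--         elif "Tips" in line:
--             current_list = tips
--         elif "Transporation" in line:
--             current_list = transportation
--         elif line.startswith("* ") or line.startswith("- "):
--             if current_list is not None:
--                 current_list.append(line[2:])
--         elif line and current_list is transportation: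
--             transportation.append(line)
--
--     return places, restaurants, tips, transportation
--
-- def extract_details(info_text):
--     sections = info_text.split("***************")[1:]
--
--     itinerary = {}
--
--     for section in sections:
--         lines = section.strip().split("\n")
--         if lines:
--             # Extract the city name from the first line
--             city_line = lines[0].strip()
--             city_name = city_line.split(" in ")[-1]
--             # Extract information for the current city
--             section_info = breakdown_section(section)
--             # Add to the itinerary dictionary
--             itinerary[city_name] = section_info
--
--     return itinerary
-- ===== SOURCE B (Python) =====
-- # B: group-then-process decomposition: split each section's lines into
-- # header-tagged segments, then collect each category's entries from its segments.
--
-- def _category(line):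
--     if "Places" in line:
--         return 0
--     if "Restaurant" in line:
--         return 1
--     if "Tips" in line:
--         return 2
--     if "Transporation" in line:
--         return 3
--     return None
--
-- def _segments(section):
--     """List of (category-or-None, stripped lines under that header)."""
--     segs = []
--     cur, buf = None, []
--     for raw in section.split("\n"):
--         line = raw.strip()
--         c = _category(line)
--         if c is not None:
--             segs.append((cur, buf))
--             cur, buf = c, []
--         else:
--             buf.append(line)
--     segs.append((cur, buf))
--     return segs
--
-- def _collect(cat, segs):
--     out = []
--     for c, buf in segs:
--         if c == cat:
--             for line in buf:
--                 if line.startswith("* ") or line.startswith("- "):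
--                     out.append(line[2:])
--                 elif line and cat == 3:
--                     out.append(line)
--     return out
--
-- def breakdown_section(section):
--     segs = _segments(section)
--     return tuple(_collect(c, segs) for c in range(4))
--
-- def extract_details(info_text):
--     itinerary = {}
--     for section in info_text.split("***************")[1:]:
--         city = section.strip().split("\n")[0].strip().split(" in ")[-1]
--         itinerary[city] = breakdown_section(section)
--     return itinerary
-- ===== Notes on version B (the rewrite author's own statement) =====
-- stated objective: alternative
-- what changed: breakdown_section's single pass with a mutable current-list pointer is replaced by a group-then-process decomposition: the lines are first split into header-tagged segments, then each category's list is collected from its segments.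
import Mathlib
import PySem

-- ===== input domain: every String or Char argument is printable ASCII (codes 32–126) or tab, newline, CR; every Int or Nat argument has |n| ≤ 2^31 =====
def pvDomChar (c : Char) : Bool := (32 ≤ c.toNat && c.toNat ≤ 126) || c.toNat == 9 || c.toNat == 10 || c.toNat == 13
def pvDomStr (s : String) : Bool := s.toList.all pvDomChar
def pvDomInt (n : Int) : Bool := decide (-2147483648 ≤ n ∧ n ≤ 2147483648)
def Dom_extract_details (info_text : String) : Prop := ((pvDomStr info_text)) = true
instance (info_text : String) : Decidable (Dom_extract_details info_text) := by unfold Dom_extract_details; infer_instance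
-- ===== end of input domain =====

-- B rewrites breakdown_section as a group-then-process decomposition (split the lines into
-- header-tagged segments, then collect each category from its segments); objective: alternative.

-- shared helper: s.split(sep) for a NONEMPTY separator (split? is some there; exact)
def pvSplit (s sep : String) : List String := (PySem.Str.split? s sep).getD []

-- ===== PORT A =====
-- A's loop state: the four lists plus a tag recording which list `current_list` aliases (none = None)
def pvStepA (st : List String × List String × List String × List String × Option Int)
    (raw : String) : List String × List String × List String × List String × Option Int :=
  let line := PySem.Str.strip raw
  let (p, r, t, tr, cur) := st
  if PySem.Str.isIn "Places" line then (p, r, t, tr, some 0)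
  else if PySem.Str.isIn "Restaurant" line then (p, r, t, tr, some 1)
  else if PySem.Str.isIn "Tips" line then (p, r, t, tr, some 2)
  else if PySem.Str.isIn "Transporation" line then (p, r, t, tr, some 3)
  else if PySem.Str.startswith line "* " || PySem.Str.startswith line "- " then
    match cur with
    | none => (p, r, t, tr, none)
    | some c =>
      if c = 0 then (p ++ [PySem.Str.slice line (some 2) none], r, t, tr, some c)
      else if c = 1 then (p, r ++ [PySem.Str.slice line (some 2) none], t, tr, some c)
      else if c = 2 then (p, r, t ++ [PySem.Str.slice line (some 2) none], tr, some c)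
      else if c = 3 then (p, r, t, tr ++ [PySem.Str.slice line (some 2) none], some c)
      else (p, r, t, tr, some c)
  else if line ≠ "" ∧ cur = some 3 then (p, r, t, tr ++ [line], cur)
  else (p, r, t, tr, cur)

def pvBreakdownA (sec : String) : List String × List String × List String × List String :=
  let st := (pvSplit sec "\n").foldl pvStepA ([], [], [], [], none)
  (st.1, st.2.1, st.2.2.1, st.2.2.2.1)

def extract_details (info_text : String) :
    List (String × List String × List String × List String × List String) :=
  ((PySem.List.slice (pvSplit info_text "***************") (some 1) none).foldl
    (fun (d : PySem.Dict String (List String × List String × List String × List String)) sec =>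
      let lines := pvSplit (PySem.Str.strip sec) "\n"
      match lines with
      | [] => d                              -- `if lines:` (the split is in fact never empty)
      | l0 :: _ =>
        let city_line := PySem.Str.strip l0
        let city_name := (pvSplit city_line " in ").getLastD ""   -- [-1] of a never-empty split
        d.insert city_name (pvBreakdownA sec))
    PySem.Dict.empty).items

-- ===== PORT B =====
def pvCategory (line : String) : Option Int :=
  if PySem.Str.isIn "Places" line then some 0
  else if PySem.Str.isIn "Restaurant" line then some 1
  else if PySem.Str.isIn "Tips" line then some 2
  else if PySem.Str.isIn "Transporation" line then some 3
  else none

def pvSegStep (st : List (Option Int × List String) × Option Int × List String)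
    (raw : String) : List (Option Int × List String) × Option Int × List String :=
  let line := PySem.Str.strip raw
  let (segs, cur, buf) := st
  match pvCategory line with
  | some c => (segs ++ [(cur, buf)], some c, [])
  | none => (segs, cur, buf ++ [line])

def pvSegments (sec : String) : List (Option Int × List String) :=
  let st := (pvSplit sec "\n").foldl pvSegStep ([], none, [])
  st.1 ++ [(st.2.1, st.2.2)]

def pvCollect (cat : Int) (segs : List (Option Int × List String)) : List String :=
  segs.foldl (fun out seg =>
    if seg.1 = some cat then
      seg.2.foldl (fun out line =>
        if PySem.Str.startswith line "* " || PySem.Str.startswith line "- " then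
          out ++ [PySem.Str.slice line (some 2) none]
        else if line ≠ "" ∧ cat = 3 then out ++ [line]
        else out) out
    else out) []

def pvBreakdownB (sec : String) : List String × List String × List String × List String :=
  let segs := pvSegments sec
  (pvCollect 0 segs, pvCollect 1 segs, pvCollect 2 segs, pvCollect 3 segs)

def extract_details_alt (info_text : String) :
    List (String × List String × List String × List String × List String) :=
  ((PySem.List.slice (pvSplit info_text "***************") (some 1) none).foldl
    (fun (d : PySem.Dict String (List String × List String × List String × List String)) sec =>
      let city := (pvSplit (PySem.Str.strip
        ((pvSplit (PySem.Str.strip sec) "\n").headD "")) " in ").getLastD ""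
      d.insert city (pvBreakdownB sec))
    PySem.Dict.empty).items

-- ===== PRECONDITION & SPEC =====
def Spec_extract_details (info_text : String) (out : List (String × List String × List String × List String × List String)) : Prop := out = extract_details_alt info_text
instance (info_text : String) (out : List (String × List String × List String × List String × List String)) : Decidable (Spec_extract_details info_text out) := by unfold Spec_extract_details; infer_instance

-- ===== CLAIM (what is proved, stated in full; the proofs are below) =====
def Claim_equal_extract_details : Prop := ∀ (info_text : String), Dom_extract_details info_text → Spec_extract_details info_text (extract_details info_text)

-- ===== LEMMAS AND PROOFS =====

-- a split by a non-empty separator is never the empty list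
lemma splitOn_go_ne_nil (sep : List Char) :
    ∀ (fuel : Nat) (l cur : List Char) (acc : List (List Char)),
      PySem.Chars.splitOn.go sep fuel l cur acc ≠ [] := by
  intro fuel
  induction fuel with
  | zero => intro l cur acc; simp [PySem.Chars.splitOn.go]
  | succ n ih =>
    intro l cur acc
    cases l with
    | nil => simp [PySem.Chars.splitOn.go]
    | cons c rest =>
      rw [PySem.Chars.splitOn.go]
      split
      · exact ih _ _ _
      · exact ih _ _ _

lemma pvSplit_ne_nil (s sep : String) (h : sep ≠ "") : pvSplit s sep ≠ [] := by
  have hsep : sep.toList.isEmpty = false := by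
    rcases hc : sep.toList with _ | ⟨a, l⟩
    · exact absurd (by simpa using congrArg String.ofList hc) h
    · simp
  have hgo := splitOn_go_ne_nil sep.toList (s.toList.length + 1) s.toList [] []
  simp only [pvSplit, PySem.Str.split?, PySem.Chars.split?, hsep, Bool.false_eq_true,
    if_false, Option.map_some, Option.getD_some, ne_eq, List.map_eq_nil_iff]
  exact fun hn => hgo (by simpa [PySem.Chars.splitOn] using hn)

-- the pure (recursive) form of B's segment grouping
def segsRec (cur : Option Int) (buf : List String) : List String → List (Option Int × List String)
  | [] => [(cur, buf)]
  | raw :: rest =>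
    match pvCategory (PySem.Str.strip raw) with
    | some c => (cur, buf) :: segsRec (some c) [] rest
    | none => segsRec cur (buf ++ [PySem.Str.strip raw]) rest

-- the contribution of one (already stripped) line to category `cat`
def entryOf (cat : Int) (line : String) : List String :=
  if PySem.Str.startswith line "* " || PySem.Str.startswith line "- " then
    [PySem.Str.slice line (some 2) none]
  else if line ≠ "" ∧ cat = 3 then [line]
  else []

def collectPure (cat : Int) (segs : List (Option Int × List String)) : List String :=
  segs.flatMap (fun seg => if seg.1 = some cat then seg.2.flatMap (entryOf cat) else [])

lemma seg_fold_eq (ls : List String) :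
    ∀ (segs : List (Option Int × List String)) (cur : Option Int) (buf : List String),
      (let st := ls.foldl pvSegStep (segs, cur, buf); st.1 ++ [(st.2.1, st.2.2)])
        = segs ++ segsRec cur buf ls := by
  induction ls with
  | nil => intro segs cur buf; simp [segsRec]
  | cons raw rest ih =>
    intro segs cur buf
    simp only [List.foldl_cons, pvSegStep, segsRec]
    cases h : pvCategory (PySem.Str.strip raw) with
    | none => simpa using ih segs cur (buf ++ [PySem.Str.strip raw])
    | some c => simpa using ih (segs ++ [(cur, buf)]) (some c) []

lemma collect_inner_eq (cat : Int) (buf : List String) :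
    ∀ out, buf.foldl (fun out line =>
        if PySem.Str.startswith line "* " || PySem.Str.startswith line "- " then
          out ++ [PySem.Str.slice line (some 2) none]
        else if line ≠ "" ∧ cat = 3 then out ++ [line]
        else out) out = out ++ buf.flatMap (entryOf cat) := by
  induction buf with
  | nil => intro out; simp
  | cons l ls ih =>
    intro out
    simp only [List.foldl_cons, List.flatMap_cons]
    rw [ih]
    unfold entryOf
    split_ifs <;> simp

lemma collect_eq (cat : Int) (segs : List (Option Int × List String)) :
    pvCollect cat segs = collectPure cat segs := by
  suffices h : ∀ out, segs.foldl (fun out seg =>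
      if seg.1 = some cat then
        seg.2.foldl (fun out line =>
          if PySem.Str.startswith line "* " || PySem.Str.startswith line "- " then
            out ++ [PySem.Str.slice line (some 2) none]
          else if line ≠ "" ∧ cat = 3 then out ++ [line]
          else out) out
      else out) out = out ++ collectPure cat segs by
    have := h []
    rw [List.nil_append] at this
    exact this
  induction segs with
  | nil => intro out; simp [collectPure]
  | cons seg rest ih =>
    intro out
    simp only [List.foldl_cons, collectPure, List.flatMap_cons]
    split_ifs with h
    · rw [collect_inner_eq, ih]
      simp [collectPure, List.append_assoc]
    · rw [ih]
      simp [collectPure]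

-- the first segment of segsRec carries tag `cur`, and a pending buffer prepends to its lines
lemma segsRec_shape (ls : List String) :
    ∀ (cur : Option Int), ∃ fb rest,
      segsRec cur [] ls = (cur, fb) :: rest ∧
      ∀ buf, segsRec cur buf ls = (cur, buf ++ fb) :: rest := by
  induction ls with
  | nil => intro cur; exact ⟨[], [], by simp [segsRec], fun buf => by simp [segsRec]⟩
  | cons raw rest ih =>
    intro cur
    cases h : pvCategory (PySem.Str.strip raw) with
    | some c =>
      refine ⟨[], segsRec (some c) [] rest, ?_, ?_⟩ <;> simp [segsRec, h]
    | none =>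
      obtain ⟨fb, rs, h1, h2⟩ := ih cur
      refine ⟨PySem.Str.strip raw :: fb, rs, ?_, ?_⟩
      · simp only [segsRec, h]
        simpa using h2 [PySem.Str.strip raw]
      · intro buf
        simp only [segsRec, h]
        rw [h2 (buf ++ [PySem.Str.strip raw])]
        simp

-- A's step on a header line just retargets the current list
lemma stepA_header (raw : String) (c : Int)
    (h : pvCategory (PySem.Str.strip raw) = some c)
    (p r t tr : List String) (cur : Option Int) :
    pvStepA (p, r, t, tr, cur) raw = (p, r, t, tr, some c) := by
  unfold pvCategory at h
  unfold pvStepA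
  split_ifs at h ⊢ <;> simp_all

lemma entryOf_bullet (cat : Int) (line : String)
    (hb : (PySem.Str.startswith line "* " || PySem.Str.startswith line "- ") = true) :
    entryOf cat line = [PySem.Str.slice line (some 2) none] := by
  simp only [entryOf, hb, if_true]

lemma entryOf_plain (cat : Int) (line : String)
    (hb : ¬ (PySem.Str.startswith line "* " || PySem.Str.startswith line "- ") = true) :
    entryOf cat line = if line ≠ "" ∧ cat = 3 then [line] else [] := by
  unfold entryOf
  rw [if_neg hb]

-- A's step on a non-header line appends that line's contribution to the current list
set_option maxHeartbeats 1000000 in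
lemma stepA_nonheader (raw : String)
    (h : pvCategory (PySem.Str.strip raw) = none)
    (p r t tr : List String) (cur : Option Int) :
    pvStepA (p, r, t, tr, cur) raw =
      (p ++ (if cur = some 0 then entryOf 0 (PySem.Str.strip raw) else []),
       r ++ (if cur = some 1 then entryOf 1 (PySem.Str.strip raw) else []),
       t ++ (if cur = some 2 then entryOf 2 (PySem.Str.strip raw) else []),
       tr ++ (if cur = some 3 then entryOf 3 (PySem.Str.strip raw) else []),
       cur) := by
  unfold pvCategory at h
  split_ifs at h with h1 h2 h3 h4
  unfold pvStepA
  simp only [h1, h2, h3, h4]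
  by_cases hb : (PySem.Str.startswith (PySem.Str.strip raw) "* "
      || PySem.Str.startswith (PySem.Str.strip raw) "- ") = true
  · simp only [hb, if_true, entryOf_bullet _ _ hb]
    cases cur with
    | none => simp
    | some c => split_ifs <;> simp_all
  · simp only [hb, entryOf_plain _ _ hb]
    cases cur with
    | none => split_ifs <;> simp_all
    | some c => split_ifs <;> simp_all

-- the main invariant: A's fold from any state is that state extended by B's per-category collections
lemma foldA_eq (ls : List String) :
    ∀ (p r t tr : List String) (cur : Option Int),
      (let st := ls.foldl pvStepA (p, r, t, tr, cur)
       (st.1, st.2.1, st.2.2.1, st.2.2.2.1))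
        = (p ++ collectPure 0 (segsRec cur [] ls),
           r ++ collectPure 1 (segsRec cur [] ls),
           t ++ collectPure 2 (segsRec cur [] ls),
           tr ++ collectPure 3 (segsRec cur [] ls)) := by
  induction ls with
  | nil => intro p r t tr cur; simp [segsRec, collectPure]
  | cons raw rest ih =>
    intro p r t tr cur
    cases h : pvCategory (PySem.Str.strip raw) with
    | some c =>
      simp only [List.foldl_cons, stepA_header raw c h]
      rw [ih]
      simp [segsRec, h, collectPure]
    | none =>
      simp only [List.foldl_cons, stepA_nonheader raw h]
      rw [ih]
      obtain ⟨fb, rs, h1, h2⟩ := segsRec_shape rest cur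
      have hcons : segsRec cur [] (raw :: rest) = (cur, PySem.Str.strip raw :: fb) :: rs := by
        simp only [segsRec, h]
        simpa using h2 [PySem.Str.strip raw]
      rw [hcons, h1]
      simp only [collectPure, List.flatMap_cons, Prod.mk.injEq]
      refine ⟨?_, ?_, ?_, ?_⟩ <;> (split_ifs <;> simp)

lemma breakdown_eq (sec : String) : pvBreakdownA sec = pvBreakdownB sec := by
  unfold pvBreakdownA pvBreakdownB pvSegments
  rw [foldA_eq]
  have hseg := seg_fold_eq (pvSplit sec "\n") [] none []
  rw [List.nil_append] at hseg
  rw [hseg]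
  simp [collect_eq]

lemma foldl_ext_dict {α β : Type} (f g : α → β → α) (h : ∀ a b, f a b = g a b) :
    ∀ (l : List β) (i : α), l.foldl f i = l.foldl g i := by
  intro l
  induction l with
  | nil => intro i; rfl
  | cons x xs ih => intro i; simp only [List.foldl_cons, h]; exact ih _

-- ===== VERDICT (by name: the statement is the Claim_ definition above) =====
set_option maxHeartbeats 1000000 in
theorem extract_details_spec : Claim_equal_extract_details := by
  intro info_text _
  unfold Spec_extract_details extract_details extract_details_alt
  congr 1
  apply foldl_ext_dict
  intro d sec
  simp only
  cases hl : pvSplit (PySem.Str.strip sec) "\n" with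
  | nil => exact absurd hl (pvSplit_ne_nil _ _ (by decide))
  | cons l0 rest => simp [breakdown_eq]
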